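-- pv_equiv track=rewrite | github.com/MinikoCappu/Kursovaya | Основная транспортная.py | delete_columns
-- ===== SOURCE A (Python) =====
-- def delete_columns(matrix, columns, rows):
--     deleted = []
--     for n in columns:
--         non_zero = 0
--         for m in rows:
--             if matrix[m][n] != 0:
--                 non_zero += 1
--                 if non_zero > 1:
--                     break
--         if non_zero <= 1:
--             deleted.append(n)
--     return deleted
-- ===== SOURCE B (Python) =====
-- def delete_columns(matrix, columns, rows):
--     cols = list(dict.fromkeys(columns))
--     counts = {}
--     for m in rows:
--         row = matrix[m]
--         for n in cols:
--             if row[n] != 0: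
--                 counts[n] = counts.get(n, 0) + 1
--     return [n for n in columns if counts.get(n, 0) <= 1]
-- ===== Notes on version B (the rewrite author's own statement) =====
-- stated objective: alternative
-- what changed: Replaces A's per-column scan with early break by a single row-major pass maintaining a count table over the distinct columns, followed by a filter of the original columns list.
-- outside the precondition, e.g. on delete_columns([[1], [1]], [0], [0, 1, 5]): A returns [], B raises IndexError
import Mathlib
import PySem

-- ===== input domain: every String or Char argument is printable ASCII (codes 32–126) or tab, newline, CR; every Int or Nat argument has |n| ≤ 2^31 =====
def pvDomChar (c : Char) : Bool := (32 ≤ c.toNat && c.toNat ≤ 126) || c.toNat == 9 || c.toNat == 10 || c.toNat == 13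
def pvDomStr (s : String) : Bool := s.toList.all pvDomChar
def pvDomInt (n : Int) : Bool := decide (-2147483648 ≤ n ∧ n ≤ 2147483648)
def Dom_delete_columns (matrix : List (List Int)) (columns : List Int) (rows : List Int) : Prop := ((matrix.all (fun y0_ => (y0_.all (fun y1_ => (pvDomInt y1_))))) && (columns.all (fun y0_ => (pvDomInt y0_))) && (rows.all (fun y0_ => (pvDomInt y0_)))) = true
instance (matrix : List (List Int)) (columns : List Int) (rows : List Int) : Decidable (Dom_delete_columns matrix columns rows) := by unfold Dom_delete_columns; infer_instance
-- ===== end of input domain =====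

-- B replaces A's per-column scan with early break by one row-major counting pass plus a filter (objective: alternative decomposition, same cost).

-- ===== PORT A =====
-- inner 'for m in rows' loop of A: counts non-zero entries of column n, breaking once the count exceeds 1
def pvInnerA (matrix : List (List Int)) (n : Int) : List Int → Int → Int
  | [], nz => nz
  | m :: rest, nz =>
    if PySem.List.pyGetD (PySem.List.pyGetD matrix m []) n 0 ≠ 0 then
      (if nz + 1 > 1 then nz + 1 else pvInnerA matrix n rest (nz + 1))
    else pvInnerA matrix n rest nz

def delete_columns (matrix : List (List Int)) (columns : List Int) (rows : List Int) : List Int :=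
  columns.foldl (fun deleted n =>
    if pvInnerA matrix n rows 0 ≤ 1 then deleted ++ [n] else deleted) []

-- ===== PORT B =====
def delete_columns_alt (matrix : List (List Int)) (columns : List Int) (rows : List Int) : List Int :=
  let cols := PySem.List.dedup columns
  let counts : PySem.Dict Int Int := rows.foldl (fun d m =>
    let row := PySem.List.pyGetD matrix m []
    cols.foldl (fun d n =>
      if PySem.List.pyGetD row n 0 ≠ 0 then d.modify n 0 (· + 1) else d) d)
    PySem.Dict.empty
  columns.filter (fun n => counts.getD n 0 ≤ 1)

-- ===== PRECONDITION & SPEC =====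
-- Pre_ excludes the index errors: every row index and every (row, column) index pair must be in range.
-- This is slightly narrower than A's exact returning set: A may also return when an out-of-range index is
-- never reached because the inner loop breaks early (or because columns is empty); B raises there.
def Pre_delete_columns (matrix : List (List Int)) (columns : List Int) (rows : List Int) : Prop :=
  ∀ m ∈ rows, PySem.Raise.InRange matrix.length m ∧
    ∀ n ∈ columns, PySem.Raise.InRange (PySem.List.pyGetD matrix m []).length n
instance (matrix : List (List Int)) (columns : List Int) (rows : List Int) : Decidable (Pre_delete_columns matrix columns rows) := by unfold Pre_delete_columns; infer_instance

def pvWitness_delete_columns : List (List Int) × List Int × List Int := ([[1, 0], [2, 3]], [0, 1], [0, 1])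

def Spec_delete_columns (matrix : List (List Int)) (columns : List Int) (rows : List Int) (out : List Int) : Prop := out = delete_columns_alt matrix columns rows
instance (matrix : List (List Int)) (columns : List Int) (rows : List Int) (out : List Int) : Decidable (Spec_delete_columns matrix columns rows out) := by unfold Spec_delete_columns; infer_instance

-- ===== CLAIM (what is proved, stated in full; the proofs are below) =====
def Claim_equal_delete_columns : Prop := ∀ (matrix : List (List Int)) (columns : List Int) (rows : List Int), Dom_delete_columns matrix columns rows → Pre_delete_columns matrix columns rows → Spec_delete_columns matrix columns rows (delete_columns matrix columns rows)

-- ===== LEMMAS AND PROOFS =====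

-- the number of rows (from `rows`) whose entry in column n is non-zero
def pvCount (matrix : List (List Int)) (n : Int) (rows : List Int) : Nat :=
  (rows.filter (fun m => PySem.List.pyGetD (PySem.List.pyGetD matrix m []) n 0 ≠ 0)).length

-- A's inner loop decides exactly 'pvCount ≤ 1'
theorem pvInnerA_le_one (matrix : List (List Int)) (n : Int) (rows : List Int) :
    ∀ nz : Int, 0 ≤ nz → (pvInnerA matrix n rows nz ≤ 1 ↔ nz + (pvCount matrix n rows : Int) ≤ 1) := by
  induction rows with
  | nil => intro nz _; simp [pvInnerA, pvCount]
  | cons m rest ih =>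
    intro nz hnz
    by_cases h : PySem.List.pyGetD (PySem.List.pyGetD matrix m []) n 0 ≠ 0
    · simp only [pvInnerA, pvCount, if_pos h, List.filter_cons, decide_eq_true_eq,
        List.length_cons]
      by_cases h2 : nz + 1 > 1
      · rw [if_pos h2]
        have : (0 : Int) ≤ (pvCount matrix n rest : Int) := Int.natCast_nonneg _
        constructor <;> intro <;> omega
      · rw [if_neg h2, ih (nz + 1) (by omega)]
        unfold pvCount
        push_cast
        omega
    · simp only [pvInnerA, pvCount, if_neg h, List.filter_cons, decide_eq_true_eq]
      rw [ih nz hnz]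
      rfl

-- inner counting fold: effect on one key
theorem pvInner_getD (row : List Int) (cols : List Int) (d : PySem.Dict Int Int) (n : Int) :
    (cols.foldl (fun d n' =>
        if PySem.List.pyGetD row n' 0 ≠ 0 then d.modify n' 0 (· + 1) else d) d).getD n 0
      = d.getD n 0 + (if PySem.List.pyGetD row n 0 ≠ 0 then (cols.count n : Int) else 0) := by
  induction cols generalizing d with
  | nil => simp
  | cons c rest ih =>
    rw [List.foldl_cons]
    by_cases hc : PySem.List.pyGetD row c 0 ≠ 0
    · rw [if_pos hc, ih, PySem.Dict.getD_modify]
      rcases eq_or_ne n c with h | h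
      · subst h
        rw [if_pos rfl, if_pos hc, if_pos hc, List.count_cons_self]
        push_cast
        ring
      · rw [if_neg h, List.count_cons_of_ne h.symm]
    · rw [if_neg hc, ih]
      congr 1
      rcases eq_or_ne n c with h | h
      · subst h
        rw [if_neg hc, if_neg hc]
      · rw [List.count_cons_of_ne h.symm]

-- outer counting fold: the table holds cols.count n copies of each non-zero hit
theorem pvOuter_getD (matrix : List (List Int)) (cols : List Int) (n : Int) :
    ∀ (rows : List Int) (d : PySem.Dict Int Int),
    (rows.foldl (fun d m =>
        cols.foldl (fun d n' =>
          if PySem.List.pyGetD (PySem.List.pyGetD matrix m []) n' 0 ≠ 0 then d.modify n' 0 (· + 1) else d) d)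
        d).getD n 0
      = d.getD n 0 + (pvCount matrix n rows : Int) * (cols.count n : Int) := by
  intro rows
  induction rows with
  | nil => intro d; simp [pvCount]
  | cons m rest ih =>
    intro d
    rw [List.foldl_cons, ih, pvInner_getD]
    unfold pvCount
    rw [List.filter_cons]
    by_cases h : PySem.List.pyGetD (PySem.List.pyGetD matrix m []) n 0 ≠ 0
    · rw [if_pos h, if_pos (by simpa using h), List.length_cons]
      push_cast
      ring
    · rw [if_neg h, if_neg (by simpa using h), add_zero]

-- ===== VERDICT (by name: the statement is the Claim_ definition above) =====
theorem delete_columns_spec : Claim_equal_delete_columns := by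
  intro matrix columns rows _ _
  unfold Spec_delete_columns delete_columns delete_columns_alt
  rw [PySem.List.foldl_append_ite_eq_filter]
  simp only [List.nil_append]
  apply List.filter_congr
  intro n hn
  have hcnt : (PySem.List.dedup columns).count n = 1 := by
    exact List.count_eq_one_of_mem (PySem.List.nodup_dedup columns) (by rw [PySem.List.mem_dedup]; exact hn)
  rw [pvOuter_getD, hcnt]
  simp only [PySem.Dict.getD_empty, Int.natCast_one, mul_one, zero_add]
  have := pvInnerA_le_one matrix n rows 0 le_rfl
  simp only [zero_add] at this
  rw [decide_eq_decide]
  exact this
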